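-- pv_equiv track=rewrite | github.com/JohnTWa/Masters_Project | common/ASCII.py | list_splitting_reordered
-- ===== SOURCE A (Python) =====
-- def list_splitting_reordered(data, number):
--
--     if not isinstance(data, (list, tuple)):
--         raise TypeError("Input must be a list or tuple.")
--     if not isinstance(number, int) or number <= 0:
--         raise ValueError("Number must be a positive integer.")
--
--     # Initialize buckets for each key
--     buckets = [[] for _ in range(number)]
--
--     # Distribute messages across keys cyclically
--     for i, message in enumerate(data):
--         buckets[i % number].append(message)
--
--     # Convert to tuple of tuples (to match the input type if it was a tuple)
--     return tuple(map(tuple, buckets)) if isinstance(data, tuple) else [tuple(bucket) for bucket in buckets]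
-- ===== SOURCE B (Python) =====
-- def list_splitting_reordered(data, number):
--
--     if not isinstance(data, (list, tuple)):
--         raise TypeError("Input must be a list or tuple.")
--     if not isinstance(number, int) or number <= 0:
--         raise ValueError("Number must be a positive integer.")
--
--     # k-th bucket is the k-th cyclic group, obtained by one strided slice.
--     buckets = [data[k::number] for k in range(number)]
--
--     return tuple(map(tuple, buckets)) if isinstance(data, tuple) else [tuple(b) for b in buckets]
-- ===== Notes on version B (the rewrite author's own statement) =====
-- stated objective: idiomatic
-- what changed: B builds each bucket directly with a strided slice data[k::number] (N strided scans, no running index or modulo), instead of A's single indexed pass that appends through i % number.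
import Mathlib
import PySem

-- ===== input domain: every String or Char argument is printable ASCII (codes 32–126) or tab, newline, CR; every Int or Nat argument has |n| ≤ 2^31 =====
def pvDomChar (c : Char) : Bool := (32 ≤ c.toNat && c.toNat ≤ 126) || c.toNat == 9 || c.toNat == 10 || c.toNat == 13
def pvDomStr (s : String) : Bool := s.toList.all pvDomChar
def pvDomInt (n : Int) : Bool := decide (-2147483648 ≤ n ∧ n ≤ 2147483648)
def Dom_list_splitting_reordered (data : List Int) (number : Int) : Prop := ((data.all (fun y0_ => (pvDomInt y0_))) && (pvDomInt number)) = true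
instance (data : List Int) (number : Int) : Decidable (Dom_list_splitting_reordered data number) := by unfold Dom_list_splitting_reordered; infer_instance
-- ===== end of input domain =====

-- B replaces A's single indexed modulo pass by one strided slice per bucket (idiomatic decomposition).
-- Both raise ValueError when number <= 0; those inputs are outside Pre_.

-- ===== PORT A =====
-- the 'for i, message in enumerate(data)' loop: buckets[i % number].append(message)
def pvDistA (number : Int) : List Int → Nat → List (List Int) → List (List Int)
  | [], _, buckets => buckets
  | message :: rest, i, buckets =>
      let idx := (PySem.Int.mod (Int.ofNat i) number).toNat
      pvDistA number rest (i + 1) (buckets.set idx (buckets.getD idx [] ++ [message]))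

def list_splitting_reordered (data : List Int) (number : Int) : List (List Int) :=
  let buckets : List (List Int) := (PySem.List.pyRange 0 number).map (fun _ => [])
  pvDistA number data 0 buckets

-- ===== PORT B =====
-- data[k::number]; slice? is none only for step 0, impossible under Pre_ (number > 0)
def list_splitting_reordered_alt (data : List Int) (number : Int) : List (List Int) :=
  (PySem.List.pyRange 0 number).map
    (fun k => (PySem.List.slice? data (some k) none number).getD [])

-- ===== PRECONDITION & SPEC =====
-- Python A raises ValueError exactly when number <= 0; no other input raises.
def Pre_list_splitting_reordered (data : List Int) (number : Int) : Prop := 0 < number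
instance (data : List Int) (number : Int) : Decidable (Pre_list_splitting_reordered data number) := by unfold Pre_list_splitting_reordered; infer_instance
def pvWitness_list_splitting_reordered : List Int × Int := ([1, 2, 3, 4, 5], 2)

def Spec_list_splitting_reordered (data : List Int) (number : Int) (out : List (List Int)) : Prop := out = list_splitting_reordered_alt data number
instance (data : List Int) (number : Int) (out : List (List Int)) : Decidable (Spec_list_splitting_reordered data number out) := by unfold Spec_list_splitting_reordered; infer_instance

-- ===== CLAIM (what is proved, stated in full; the proofs are below) =====
def Claim_equal_list_splitting_reordered : Prop := ∀ (data : List Int) (number : Int), Dom_list_splitting_reordered data number → Pre_list_splitting_reordered data number → Spec_list_splitting_reordered data number (list_splitting_reordered data number)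

-- ===== LEMMAS AND PROOFS =====

-- Canonical "pick every N-th element after skipping k" list (bucket k is pvStride N k data).
def pvStride (N : Nat) : Nat → List Int → List Int
  | _, [] => []
  | 0, x :: xs => x :: pvStride N (N - 1) xs
  | k + 1, _ :: xs => pvStride N k xs

-- distance (in steps) from current residue r to bucket j
def pvOff (N r j : Nat) : Nat := if r ≤ j then j - r else N + j - r

lemma pvStride_nil (N k : Nat) : pvStride N k [] = [] := by cases k <;> rfl

lemma pyRange_cast (N : Nat) :
    PySem.List.pyRange 0 (N : Int) = List.map Nat.cast (List.range N) := by
  rw [PySem.List.pyRange, if_neg (by norm_num : ¬(1:Int) = 0)]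
  have hc : (if 0 < (1:Int) then (if (0:Int) < (N:Int) then (((N:Int) - 0 + 1 - 1) / 1).toNat else 0)
      else if (N:Int) < 0 then (((0:Int) - (N:Int) + -1 - 1) / -1).toNat else 0) = N := by
    split_ifs <;> omega
  simp only [hc]
  exact List.map_congr_left (fun a _ => by ring)

lemma fmod_cast (i N : Nat) : PySem.Int.mod (Int.ofNat i) (Int.ofNat N) = Int.ofNat (i % N) := by
  rw [PySem.Int.mod, Int.fmod_eq_emod]
  simp

lemma succ_mod (i N : Nat) (hN : 0 < N) :
    (i + 1) % N = if i % N + 1 = N then 0 else i % N + 1 := by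
  conv_lhs => rw [Nat.add_mod]
  rcases Nat.eq_or_lt_of_le hN with h | h
  · rw [← h]; simp [Nat.mod_one]
  · have h1 : 1 % N = 1 := Nat.mod_eq_of_lt h
    rw [h1]
    have := Nat.mod_lt i hN
    split_ifs with h2
    · rw [h2, Nat.mod_self]
    · exact Nat.mod_eq_of_lt (by omega)

lemma distA_eq (N : Nat) (hN : 0 < N) :
    ∀ (xs : List Int) (i : Nat) (bs : List (List Int)), bs.length = N →
      pvDistA (N : Int) xs i bs =
        bs.mapIdx (fun j b => b ++ pvStride N (pvOff N (i % N) j) xs) := by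
  intro xs
  induction xs with
  | nil =>
    intro i bs hlen
    simp only [pvDistA, pvStride_nil, List.append_nil]
    apply List.ext_getElem <;> simp
  | cons x rest ih =>
    intro i bs hlen
    have hm : i % N < N := Nat.mod_lt i hN
    have hidx : (PySem.Int.mod (Int.ofNat i) (N : Int)).toNat = i % N := by
      rw [show ((N : Int)) = Int.ofNat N from rfl, fmod_cast]; simp; omega
    rw [pvDistA, hidx]
    rw [ih (i + 1) _ (by simp [hlen])]
    apply List.ext_getElem
    · simp [hlen]
    · intro j hj1 hj2
      have hjN : j < N := by simp [hlen] at hj1; omega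
      simp only [List.getElem_mapIdx, List.getElem_set]
      by_cases hje : i % N = j
      · subst hje
        have h0 : pvOff N (i % N) (i % N) = 0 := by simp [pvOff]
        have h1 : pvOff N ((i + 1) % N) (i % N) = N - 1 := by
          rw [succ_mod i N hN]; unfold pvOff; split_ifs <;> omega
        simp [h0, h1, pvStride]
        rw [List.getElem?_eq_getElem (show i % N < bs.length by omega)]
        rfl
      · have hpos : 0 < pvOff N (i % N) j := by unfold pvOff; split_ifs <;> omega
        have heq : pvOff N ((i + 1) % N) j = pvOff N (i % N) j - 1 := by
          rw [succ_mod i N hN]; unfold pvOff; split_ifs <;> omega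
        have h2 : pvOff N (i % N) j = (pvOff N (i % N) j - 1) + 1 := by omega
        simp only [if_neg hje, heq]
        conv_rhs => rw [h2, pvStride]

-- slice? with nonnegative start, no stop, positive step, written as one filterMap over a range
def pvPick (xs : List Int) (k N : Nat) : List Int :=
  (List.range (if k < xs.length then (xs.length - k + N - 1) / N else 0)).filterMap
    (fun j => xs[(k + N * j)]?)

lemma slice?_eq_pick (N : Nat) (hN : 0 < N) (xs : List Int) (k : Nat) :
    PySem.List.slice? xs (some (k : Int)) none (N : Int) = some (pvPick xs k N) := by
  rw [PySem.List.slice?]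
  rw [if_neg (by omega : ¬ (N : Int) = 0)]
  rw [PySem.List.sliceIndices]
  simp only [if_neg (by omega : ¬ (N : Int) < 0), if_pos (by omega : (0:Int) < (N : Int)),
    if_neg (by omega : ¬ (k : Int) < 0)]
  by_cases hk : k < xs.length
  · have hmin : min (k : Int) (xs.length : Int) = (k : Int) := by omega
    rw [hmin, if_pos (by omega : (k : Int) < (xs.length : Int))]
    have hcount : (((xs.length : Int) - (k : Int) + (N : Int) - 1) / (N : Int)).toNat
        = (xs.length - k + N - 1) / N := by
      rw [show ((xs.length : Int) - (k : Int) + (N : Int) - 1)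
            = ((xs.length - k + N - 1 : Nat) : Int) by omega]
      rw [← Int.natCast_div]
      exact Int.toNat_natCast _
    rw [hcount, pvPick, if_pos hk]
    congr 1
  · have hmin : min (k : Int) (xs.length : Int) = (xs.length : Int) := by omega
    rw [hmin, if_neg (by omega : ¬ (xs.length : Int) < (xs.length : Int))]
    rw [pvPick, if_neg hk]
    simp

lemma pick_eq_stride (N : Nat) (hN : 0 < N) :
    ∀ (xs : List Int) (k : Nat), pvPick xs k N = pvStride N k xs := by
  intro xs
  induction xs with
  | nil => intro k; simp [pvPick, pvStride]
  | cons x rest ih =>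
    intro k
    cases k with
    | succ k' =>
      have hcnt : (if k' + 1 < (x :: rest).length then ((x :: rest).length - (k' + 1) + N - 1) / N else 0)
          = (if k' < rest.length then (rest.length - k' + N - 1) / N else 0) := by
        simp only [List.length_cons]
        by_cases h : k' < rest.length
        · rw [if_pos (by omega), if_pos h]; congr 1; omega
        · rw [if_neg (by omega), if_neg h]
      rw [pvPick, hcnt, pvStride, ← ih k', pvPick]
      congr 1
      funext j
      simp [show k' + 1 + N * j = (k' + N * j) + 1 by omega]
    | zero =>
      have hcnt : (if 0 < (x :: rest).length then ((x :: rest).length - 0 + N - 1) / N else 0)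
          = rest.length / N + 1 := by
        rw [if_pos (by simp)]
        rw [show (x :: rest).length - 0 + N - 1 = rest.length + N by simp only [List.length_cons]; omega,
          Nat.add_div_right _ hN]
      have hcnt' : (if N - 1 < rest.length then (rest.length - (N - 1) + N - 1) / N else 0)
          = rest.length / N := by
        split_ifs with h
        · congr 1; omega
        · rw [Nat.div_eq_of_lt (by omega)]
      rw [pvPick, hcnt, pvStride, ← ih (N - 1), pvPick, hcnt']
      rw [List.range_succ_eq_map, List.filterMap_cons]
      simp only [Nat.mul_zero, Nat.add_zero, List.getElem?_cons_zero]
      rw [List.filterMap_map]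
      congr 1
      congr 1
      funext j
      simp only [Function.comp]
      rw [show 0 + N * (j + 1) = (N - 1 + N * j) + 1 by rw [Nat.mul_add, Nat.mul_one]; omega]
      simp

-- ===== VERDICT (by name: the statement is the Claim_ definition above) =====
theorem list_splitting_reordered_spec : Claim_equal_list_splitting_reordered := by
  intro data number hdom hpre
  unfold Pre_list_splitting_reordered at hpre
  unfold Spec_list_splitting_reordered
  obtain ⟨N, rfl⟩ : ∃ N : Nat, number = (N : Int) :=
    ⟨number.toNat, (Int.toNat_of_nonneg (le_of_lt hpre)).symm⟩
  have hN : 0 < N := by exact_mod_cast hpre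
  rw [list_splitting_reordered, list_splitting_reordered_alt]
  simp only [pyRange_cast]
  rw [distA_eq N hN data 0 _ (by simp)]
  apply List.ext_getElem
  · simp
  · intro j hj1 hj2
    have hjN : j < N := by simpa using hj1
    simp only [List.getElem_mapIdx, List.getElem_map, List.getElem_range,
      Nat.zero_mod, List.nil_append]
    rw [slice?_eq_pick N hN data j, show pvOff N 0 j = j by simp [pvOff]]
    simp [pick_eq_stride N hN data j]
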